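-- pv_equiv track=rewrite | github.com/Laplx/ARC | eval/adapters/codec.py | deserialize_grid
-- ===== SOURCE A (Python) =====
-- _ALLOWED_CHARS = set("0123456789\n")
--
-- def deserialize_grid(text: str) -> list[list[int]] | None:
--     filtered = "".join(ch for ch in text if ch in _ALLOWED_CHARS)
--     filtered = filtered.strip("\n")
--     if not filtered:
--         return None
--     lines = [line for line in filtered.splitlines() if line]
--     if not lines:
--         return None
--     return [[int(ch) for ch in line] for line in lines]
-- ===== SOURCE B (Python) =====
-- def deserialize_grid(text: str) -> list[list[int]] | None:
--     grid = []
--     row = []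
--     for ch in text:
--         if '0' <= ch <= '9':
--             row.append(ord(ch) - 48)
--         elif ch == '\n':
--             if row:
--                 grid.append(row)
--             row = []
--     if row:
--         grid.append(row)
--     return grid if grid else None
-- ===== Notes on version B (the rewrite author's own statement) =====
-- stated objective: alternative
-- what changed: Replaced the filter/join/strip/splitlines/comprehension pipeline with a single-pass state-machine over the characters maintaining the grid and the current row.
import Mathlib
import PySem

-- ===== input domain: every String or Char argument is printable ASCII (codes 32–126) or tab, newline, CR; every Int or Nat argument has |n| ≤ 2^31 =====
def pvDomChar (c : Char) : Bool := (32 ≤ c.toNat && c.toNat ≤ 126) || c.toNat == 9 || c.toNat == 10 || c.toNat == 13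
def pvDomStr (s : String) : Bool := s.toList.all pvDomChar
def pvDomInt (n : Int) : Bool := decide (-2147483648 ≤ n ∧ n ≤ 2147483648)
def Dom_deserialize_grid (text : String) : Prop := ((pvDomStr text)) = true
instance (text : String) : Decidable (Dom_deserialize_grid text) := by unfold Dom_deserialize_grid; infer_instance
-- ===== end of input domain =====

-- B replaces A's filter/strip/splitlines/comprehension pipeline by a single-pass state machine
-- over the characters (objective: alternative decomposition, same O(n) cost).

-- ===== PORT A =====
def pvAllowed : PySem.Set Char := PySem.Set.ofList "0123456789\n".toList

-- int(ch); ch is always a single digit where A applies it, so the total form's default is never used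
def pvIntOf (ch : Char) : Int := (PySem.Int.ofChars? [ch]).getD 0

def deserialize_grid (text : String) : Option (List (List Int)) :=
  let filtered : List Char := text.toList.filter (fun ch => pvAllowed.contains ch)
  let filtered2 : List Char := PySem.Chars.stripChars filtered ['\n']
  if filtered2.isEmpty then none
  else
    let lines := (PySem.Chars.splitlines filtered2).filter (fun line => !line.isEmpty)
    if lines.isEmpty then none
    else some (lines.map (fun line => line.map pvIntOf))

-- ===== PORT B =====
def dgFlush (grid : List (List Int)) (row : List Int) : List (List Int) :=
  if row.isEmpty then grid else grid ++ [row]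

def dgLoop : List Char → List (List Int) → List Int → List (List Int)
  | [], grid, row => dgFlush grid row
  | c :: cs, grid, row =>
    if '0' ≤ c ∧ c ≤ '9' then dgLoop cs grid (row ++ [(c.toNat : Int) - 48])
    else if c = '\n' then dgLoop cs (dgFlush grid row) []
    else dgLoop cs grid row

def deserialize_grid_alt (text : String) : Option (List (List Int)) :=
  let grid := dgLoop text.toList [] []
  if grid.isEmpty then none else some grid

-- ===== PRECONDITION & SPEC =====
def Spec_deserialize_grid (text : String) (out : Option (List (List Int))) : Prop := out = deserialize_grid_alt text
instance (text : String) (out : Option (List (List Int))) : Decidable (Spec_deserialize_grid text out) := by unfold Spec_deserialize_grid; infer_instance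

-- ===== CLAIM (what is proved, stated in full; the proofs are below) =====
def Claim_equal_deserialize_grid : Prop := ∀ (text : String), Dom_deserialize_grid text → Spec_deserialize_grid text (deserialize_grid text)

-- ===== LEMMAS AND PROOFS =====

-- the character class A's filter keeps, as a plain list predicate
def pvI (c : Char) : Bool := "0123456789\n".toList.contains c

theorem char_eq_lit (c : Char) {n : Nat} (d : Char) (h : c.toNat = n) (hd : d.toNat = n) : c = d := by
  have hv : c.val.toNat = d.val.toNat := by unfold Char.toNat at h hd; omega
  exact Char.ext (UInt32.toNat_inj.mp hv)
theorem pvI_iff (c : Char) : pvI c = true ↔ (('0' ≤ c ∧ c ≤ '9') ∨ c = '\n') := by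
  constructor
  · intro h
    simp [pvI] at h
    rcases h with h|h|h|h|h|h|h|h|h|h|h <;> subst h <;> first | (left; exact ⟨by decide, by decide⟩) | (right; rfl)
  · rintro (⟨h1, h2⟩ | rfl)
    · have hn : 48 ≤ c.toNat ∧ c.toNat ≤ 57 := ⟨h1, h2⟩
      have : c.toNat = 48 ∨ c.toNat = 49 ∨ c.toNat = 50 ∨ c.toNat = 51 ∨ c.toNat = 52 ∨ c.toNat = 53 ∨ c.toNat = 54 ∨ c.toNat = 55 ∨ c.toNat = 56 ∨ c.toNat = 57 := by omega
      simp [pvI]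
      rcases this with h|h|h|h|h|h|h|h|h|h
      · exact Or.inl (char_eq_lit c '0' h rfl)
      · exact Or.inr (Or.inl (char_eq_lit c '1' h rfl))
      · exact Or.inr (Or.inr (Or.inl (char_eq_lit c '2' h rfl)))
      · exact Or.inr (Or.inr (Or.inr (Or.inl (char_eq_lit c '3' h rfl))))
      · exact Or.inr (Or.inr (Or.inr (Or.inr (Or.inl (char_eq_lit c '4' h rfl)))))
      · exact Or.inr (Or.inr (Or.inr (Or.inr (Or.inr (Or.inl (char_eq_lit c '5' h rfl))))))
      · exact Or.inr (Or.inr (Or.inr (Or.inr (Or.inr (Or.inr (Or.inl (char_eq_lit c '6' h rfl)))))))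
      · exact Or.inr (Or.inr (Or.inr (Or.inr (Or.inr (Or.inr (Or.inr (Or.inl (char_eq_lit c '7' h rfl))))))))
      · exact Or.inr (Or.inr (Or.inr (Or.inr (Or.inr (Or.inr (Or.inr (Or.inr (Or.inl (char_eq_lit c '8' h rfl)))))))))
      · exact Or.inr (Or.inr (Or.inr (Or.inr (Or.inr (Or.inr (Or.inr (Or.inr (Or.inr (Or.inl (char_eq_lit c '9' h rfl))))))))))
    · decide


theorem pvIntOf_digit (c : Char) (h1 : '0' ≤ c) (h2 : c ≤ '9') :
    pvIntOf c = (c.toNat : Int) - 48 := by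
  have hn : 48 ≤ c.toNat ∧ c.toNat ≤ 57 := ⟨h1, h2⟩
  have h : c.toNat = 48 ∨ c.toNat = 49 ∨ c.toNat = 50 ∨ c.toNat = 51 ∨ c.toNat = 52 ∨ c.toNat = 53 ∨ c.toNat = 54 ∨ c.toNat = 55 ∨ c.toNat = 56 ∨ c.toNat = 57 := by omega
  rcases h with h|h|h|h|h|h|h|h|h|h
  · rw [char_eq_lit c '0' h rfl]; decide
  · rw [char_eq_lit c '1' h rfl]; decide
  · rw [char_eq_lit c '2' h rfl]; decide
  · rw [char_eq_lit c '3' h rfl]; decide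
  · rw [char_eq_lit c '4' h rfl]; decide
  · rw [char_eq_lit c '5' h rfl]; decide
  · rw [char_eq_lit c '6' h rfl]; decide
  · rw [char_eq_lit c '7' h rfl]; decide
  · rw [char_eq_lit c '8' h rfl]; decide
  · rw [char_eq_lit c '9' h rfl]; decide


theorem dgLoop_filter (cs : List Char) (g : List (List Int)) (r : List Int) :
    dgLoop cs g r = dgLoop (cs.filter pvI) g r := by
  induction cs generalizing g r with
  | nil => rfl
  | cons c cs ih =>
    by_cases hc : pvI c
    · rcases (pvI_iff c).mp hc with ⟨h1, h2⟩ | rfl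
      · simp only [List.filter_cons, hc, if_pos, dgLoop, h1, h2, and_self, ite_true]
        exact ih _ _
      · simp only [List.filter_cons, hc, if_pos, dgLoop]
        rw [if_neg (by decide : ¬ ('0' ≤ '\n' ∧ '\n' ≤ '9')), if_neg (by decide : ¬ ('0' ≤ '\n' ∧ '\n' ≤ '9'))]
        exact ih _ _
    · have h1 : ¬ ('0' ≤ c ∧ c ≤ '9') := fun h => hc ((pvI_iff c).mpr (Or.inl h))
      have h2 : c ≠ '\n' := fun h => hc ((pvI_iff c).mpr (Or.inr h))
      simp only [List.filter_cons, hc, if_neg, dgLoop, h1, h2, ite_false, Bool.false_eq_true]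
      exact ih _ _

theorem dgLoop_trail (trail : List Char) (h : trail.all (· = '\n')) (g : List (List Int)) (r : List Int) :
    dgLoop trail g r = dgFlush g r := by
  induction trail generalizing g r with
  | nil => rfl
  | cons c cs ih =>
    simp only [List.all_cons, Bool.and_eq_true, decide_eq_true_eq] at h
    obtain ⟨rfl, h⟩ := h
    simp only [dgLoop, if_neg (by decide : ¬ ('0' ≤ '\n' ∧ '\n' ≤ '9')), if_pos rfl]
    rw [ih h]
    simp [dgFlush]

theorem dgLoop_append_trail (ds trail : List Char) (h : trail.all (· = '\n'))
    (g : List (List Int)) (r : List Int) :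
    dgLoop (ds ++ trail) g r = dgLoop ds g r := by
  induction ds generalizing g r with
  | nil => simpa [dgLoop] using dgLoop_trail trail h g r
  | cons c cs ih =>
    simp only [List.cons_append, dgLoop]
    split
    · exact ih _ _
    · split
      · exact ih _ _
      · exact ih _ _

theorem dgLoop_lead (lead : List Char) (h : lead.all (· = '\n')) (ds : List Char)
    (g : List (List Int)) :
    dgLoop (lead ++ ds) g [] = dgLoop ds g [] := by
  induction lead with
  | nil => rfl
  | cons c cs ih =>
    simp only [List.all_cons, Bool.and_eq_true, decide_eq_true_eq] at h
    obtain ⟨rfl, h⟩ := h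
    simp only [List.cons_append, dgLoop, if_neg (by decide : ¬ ('0' ≤ '\n' ∧ '\n' ≤ '9')), if_pos rfl]
    simpa [dgFlush] using ih h

theorem dgLoop_acc (ds : List Char) (g : List (List Int)) (r : List Int) :
    dgLoop ds g r = g ++ dgLoop ds [] r := by
  induction ds generalizing g r with
  | nil => by_cases h : r.isEmpty <;> simp [dgLoop, dgFlush, h]
  | cons c cs ih =>
    simp only [dgLoop]
    split
    · exact ih _ _
    · split
      · rw [ih (dgFlush g r) [], ih (dgFlush [] r) []]
        by_cases h : r.isEmpty <;> simp [dgFlush, h]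
      · exact ih _ _


theorem go_cons (isB : Char → Bool) (c : Char) (rest : List Char) (cur : List Char) (acc : List (List Char))
    (hc : c ≠ '\r') :
    PySem.Chars.splitlines.go isB (c :: rest) cur acc =
      if isB c then PySem.Chars.splitlines.go isB rest [] (cur.reverse :: acc)
      else PySem.Chars.splitlines.go isB rest (c :: cur) acc := by
  rw [PySem.Chars.splitlines.go.eq_def]
  split
  · simp_all
  · simp_all
  · rename_i heq
    injection heq with h1 h2
    subst h1; subst h2; rfl

theorem go_nil (isB : Char → Bool) (cur : List Char) (acc : List (List Char)) :
    PySem.Chars.splitlines.go isB [] cur acc =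
      if cur.isEmpty then acc.reverse else (cur.reverse :: acc).reverse := by
  rw [PySem.Chars.splitlines.go.eq_def]

theorem go_acc (isB : Char → Bool) (ds : List Char) (h : ds.all (· ≠ '\r')) (cur : List Char)
    (acc : List (List Char)) :
    PySem.Chars.splitlines.go isB ds cur acc = acc.reverse ++ PySem.Chars.splitlines.go isB ds cur [] := by
  induction ds generalizing cur acc with
  | nil =>
    rw [go_nil, go_nil]
    by_cases hc : cur.isEmpty <;> simp [hc]
  | cons c cs ih =>
    simp only [List.all_cons, Bool.and_eq_true, decide_eq_true_eq] at h
    obtain ⟨hc, h⟩ := h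
    rw [go_cons isB c cs cur acc hc, go_cons isB c cs cur [] hc]
    by_cases hb : isB c
    · rw [if_pos hb, if_pos hb, ih h, ih h [] [cur.reverse]]
      simp
    · rw [if_neg hb, if_neg hb, ih h]

theorem pvI_no_cr (ds : List Char) (h : ds.all pvI = true) : ds.all (· ≠ '\r') = true := by
  rw [List.all_eq_true] at h ⊢
  intro x hx
  rcases (pvI_iff x).mp (h x hx) with ⟨h1, h2⟩ | rfl
  · simp only [decide_eq_true_eq]
    intro hr; subst hr
    exact (by decide : ¬('0' ≤ ('\r':Char) ∧ ('\r':Char) ≤ '9')) ⟨h1, h2⟩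
  · decide

theorem go_dgLoop (isB : Char → Bool) (hB : ∀ c, pvI c = true → (isB c = true ↔ c = '\n')) :
    ∀ (ds : List Char), ds.all pvI = true → ∀ (cur : List Char),
      cur.all (fun c => '0' ≤ c ∧ c ≤ '9') = true →
    ((PySem.Chars.splitlines.go isB ds cur []).filter (fun line => !line.isEmpty)).map
        (fun line => line.map pvIntOf)
      = dgLoop ds [] (cur.reverse.map (fun c => (c.toNat : Int) - 48)) := by
  have hconv : ∀ cur : List Char, cur.all (fun c => '0' ≤ c ∧ c ≤ '9') →
      cur.map pvIntOf = cur.map (fun c => (c.toNat : Int) - 48) := by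
    intro l hl
    apply List.map_congr_left
    intro x hx
    simp only [List.all_eq_true, decide_eq_true_eq] at hl
    exact pvIntOf_digit x (hl x hx).1 (hl x hx).2
  intro ds
  induction ds with
  | nil =>
    intro _ cur hcur
    rw [go_nil]
    by_cases hc : cur.isEmpty
    · have : cur = [] := by simpa [List.isEmpty_iff] using hc
      subst this
      simp [dgLoop, dgFlush]
    · have hne : cur ≠ [] := by simpa [List.isEmpty_iff] using hc
      rw [if_neg hc]
      simp only [dgLoop, dgFlush]
      rw [if_neg (by simp [hne])]
      simp only [List.reverse_cons, List.reverse_nil, List.nil_append]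
      rw [List.filter_cons_of_pos (by simp [hne])]
      simp only [List.filter_nil, List.map_cons, List.map_nil]
      rw [hconv cur.reverse (by simpa using hcur), List.map_reverse]
  | cons c cs ih =>
    intro h cur hcur
    have hnr := pvI_no_cr _ h
    simp only [List.all_cons, Bool.and_eq_true] at h hnr
    obtain ⟨hc, h⟩ := h
    obtain ⟨hcr, hnr'⟩ := hnr
    rw [go_cons isB c cs cur [] (by simpa using hcr)]
    rcases (pvI_iff c).mp hc with ⟨h1, h2⟩ | rfl
    · have hb : isB c = false := by
        rcases Bool.eq_false_or_eq_true (isB c) with hb | hb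
        · have := (hB c hc).mp hb
          subst this; exact absurd (And.intro h1 h2) (by decide)
        · exact hb
      rw [if_neg (by simp [hb])]
      rw [ih h (c :: cur) (by simp_all)]
      simp only [dgLoop, if_pos (And.intro h1 h2)]
      simp [List.map_append]
    · have hb : isB '\n' = true := (hB _ hc).mpr rfl
      rw [if_pos hb]
      rw [go_acc isB cs hnr' [] [cur.reverse]]
      simp only [List.reverse_cons, List.reverse_nil, List.nil_append]
      rw [List.filter_append, List.map_append]
      rw [ih h [] (by simp)]
      simp only [dgLoop, if_neg (by decide : ¬ ('0' ≤ '\n' ∧ '\n' ≤ '9')), if_pos rfl]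
      rw [dgLoop_acc cs (dgFlush [] (cur.reverse.map fun c => (c.toNat : Int) - 48)) []]
      congr 1
      by_cases hce : cur.isEmpty
      · have : cur = [] := by simpa [List.isEmpty_iff] using hce
        subst this; simp [dgFlush]
      · have hne : cur ≠ [] := by simpa [List.isEmpty_iff] using hce
        rw [List.filter_cons_of_pos (by simp [hne]), dgFlush, if_neg (by simp [hne])]
        simp only [List.filter_nil, List.map_cons, List.map_nil]
        rw [hconv cur.reverse (by simpa using hcur), List.map_reverse]
        simp


theorem strip_decomp (s : List Char) :
    ∃ lead trail : List Char, lead.all (· = '\n') = true ∧ trail.all (· = '\n') = true ∧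
      s = lead ++ PySem.Chars.stripChars s ['\n'] ++ trail := by
  have hp : ∀ l : List Char, (List.takeWhile (fun c => (['\n'].contains c)) l).all (· = '\n') = true := by
    intro l
    rw [List.all_eq_true]
    intro x hx
    have := List.mem_takeWhile_imp hx
    simpa using this
  refine ⟨List.takeWhile (fun c => (['\n'].contains c)) s,
    (List.takeWhile (fun c => (['\n'].contains c)) (List.dropWhile (fun c => (['\n'].contains c)) s).reverse).reverse,
    hp s, by simpa using hp _, ?_⟩
  show s = _ ++ (List.dropWhile (fun c => (['\n'].contains c)) (List.dropWhile (fun c => (['\n'].contains c)) s).reverse).reverse ++ _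
  conv_lhs => rw [← List.takeWhile_append_dropWhile (p := fun c => (['\n'].contains c)) (l := s)]
  rw [List.append_assoc]
  congr 1
  conv_lhs => rw [← List.reverse_reverse (List.dropWhile (fun c => (['\n'].contains c)) s),
    ← List.takeWhile_append_dropWhile (p := fun c => (['\n'].contains c)) (l := (List.dropWhile (fun c => (['\n'].contains c)) s).reverse)]
  rw [List.reverse_append]

-- ===== VERDICT (by name: the statement is the Claim_ definition above) =====
theorem deserialize_grid_spec : Claim_equal_deserialize_grid := by
  intro text _
  unfold Spec_deserialize_grid deserialize_grid deserialize_grid_alt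
  simp only []
  have hfilter : text.toList.filter (fun ch => pvAllowed.contains ch) = text.toList.filter pvI := by
    apply List.filter_congr
    intro x _
    simp [pvAllowed, pvI, PySem.Set.ofList, PySem.Set.contains]
  rw [hfilter]
  set cs := text.toList with hcs
  set fs := cs.filter pvI with hfs
  set sd := PySem.Chars.stripChars fs ['\n'] with hsd
  obtain ⟨lead, trail, hlead, htrail, hdec⟩ := strip_decomp fs
  have hfsall : fs.all pvI = true := by
    rw [List.all_eq_true]
    intro x hx
    exact (List.mem_filter.mp hx).2
  have hsdall : sd.all pvI = true := by
    rw [hdec] at hfsall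
    simp only [List.all_append, Bool.and_eq_true] at hfsall
    exact hfsall.1.2
  have hB : ∀ c, pvI c = true → ((decide (c.toNat = 10) || decide (c.toNat = 13) || decide (c.toNat = 11) || decide (c.toNat = 12) || decide (c.toNat = 28) || decide (c.toNat = 29) || decide (c.toNat = 30) || decide (c.toNat = 133) || decide (c.toNat = 8232) || decide (c.toNat = 8233)) = true ↔ c = '\n') := by
    intro c hc
    rcases (pvI_iff c).mp hc with ⟨h1, h2⟩ | rfl
    · have hn : 48 ≤ c.toNat ∧ c.toNat ≤ 57 := ⟨h1, h2⟩
      constructor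
      · intro hb
        simp only [Bool.or_eq_true, decide_eq_true_eq] at hb
        omega
      · intro hb; subst hb; exact absurd hn (by decide)
    · simp
  have hkey : ((PySem.Chars.splitlines sd).filter (fun line => !line.isEmpty)).map
        (fun line => line.map pvIntOf) = dgLoop sd [] [] := by
    have := go_dgLoop _ hB sd hsdall [] rfl
    simpa using this
  have hD : dgLoop cs [] [] = dgLoop sd [] [] := by
    rw [dgLoop_filter cs [] [], ← hfs, hdec, List.append_assoc,
      dgLoop_lead lead hlead _ [], dgLoop_append_trail sd trail htrail [] []]
  by_cases hsde : sd.isEmpty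
  · rw [if_pos hsde]
    have : sd = [] := by simpa [List.isEmpty_iff] using hsde
    have hnil : dgLoop cs [] [] = [] := by rw [hD, this]; rfl
    rw [hnil]
    rfl
  · rw [if_neg hsde]
    by_cases hl : ((PySem.Chars.splitlines sd).filter (fun line => !line.isEmpty)).isEmpty
    · rw [if_pos hl]
      have : (PySem.Chars.splitlines sd).filter (fun line => !line.isEmpty) = [] := by
        simpa [List.isEmpty_iff] using hl
      have hnil : dgLoop cs [] [] = [] := by rw [hD, ← hkey, this]; rfl
      rw [hnil]; rfl
    · rw [if_neg hl]
      have hne : (PySem.Chars.splitlines sd).filter (fun line => !line.isEmpty) ≠ [] := by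
        simpa [List.isEmpty_iff] using hl
      have hDne : dgLoop cs [] [] ≠ [] := by
        rw [hD, ← hkey]
        simpa using hne
      rw [if_neg (by simpa [List.isEmpty_iff] using hDne)]
      rw [hD, ← hkey]
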